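-- pv_equiv track=rewrite | github.com/hiro4honda/phoneme-balance-sentence-extractor | extract_balance_sentence.py | extract_sentence
-- ===== SOURCE A (Python) =====
-- def extract_sentence(in_org_sentences, in_kana_sentences, in_phonemes, phoneme_chain):
--     out_org_sentences = []
--     out_phonemes = []
--     out_kana_sentences = []
--
--     phoneme_chain_nonzero = {}
--     for k, v in phoneme_chain.items():
--         if v != 0:
--             phoneme_chain_nonzero[k] = v
--
--     phoneme_chain_check = {}
--     for k, v in phoneme_chain_nonzero.items():
--         phoneme_chain_check[k] = 0
--
--     phoneme_chain_sorted = sorted(phoneme_chain_nonzero.items(), key=lambda x:x[1])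
--
--     for i in range(0, len(phoneme_chain_sorted)):
--         if phoneme_chain_check[phoneme_chain_sorted[i][0]] == 0:
--             w1 = phoneme_chain_sorted[i][0].split()
--
--             for j in range(0, len(in_phonemes)):
--                 find_chain = False
--                 w2 = in_phonemes[j].split()
--                 if len(w1) == 2:
--                     for k in range(1, len(w2)):
--                         if w1[0] == w2[k-1] and w1[1] == w2[k]:
--                             find_chain = True
--                             break
--
--                 elif len(w1) == 3:
--                     for k in range(2, len(w2)):
--                         if w1[0] == w2[k-2] and w1[1] == w2[k-1] and w1[2] == w2[k]:
--                             find_chain = True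
--                             break
--
--                 if find_chain:
--                     for k in range(1, len(w2)):
--                         x = w2[k-1] + ' ' + w2[k]
--                         if phoneme_chain_check.get(x) != None:
--                             phoneme_chain_check[x] = 1
--
--                     for k in range(2, len(w2)):
--                         x = w2[k-2] + ' ' + w2[k-1] + ' ' + w2[k]
--                         if phoneme_chain_check.get(x) != None:
--                             phoneme_chain_check[x] = 1
--
--                     out_org_sentences.append(in_org_sentences[j])
--                     out_phonemes.append(in_phonemes[j])
--                     out_kana_sentences.append(in_kana_sentences[j])
--
--                     break
--
--
--     return out_org_sentences, out_kana_sentences, out_phonemes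
-- ===== SOURCE B (Python) =====
-- def extract_sentence(in_org_sentences, in_kana_sentences, in_phonemes, phoneme_chain):
--     toks = [s.split() for s in in_phonemes]
--     first2, first3 = {}, {}
--     for j, w in enumerate(toks):
--         for q in zip(w, w[1:]):
--             first2.setdefault(q, j)
--         for q in zip(w, w[1:], w[2:]):
--             first3.setdefault(q, j)
--     nonzero = [(k, v) for k, v in phoneme_chain.items() if v != 0]
--     chains = sorted(nonzero, key=lambda x: x[1])
--     check = {k: 0 for k, _ in nonzero}
--     out_org, out_kana, out_phonemes = [], [], []
--     for c, _ in chains: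
--         if check[c] != 0:
--             continue
--         w1 = c.split()
--         if len(w1) == 2:
--             j = first2.get((w1[0], w1[1]))
--         elif len(w1) == 3:
--             j = first3.get((w1[0], w1[1], w1[2]))
--         else:
--             j = None
--         if j is None:
--             continue
--         w2 = toks[j]
--         for k in range(1, len(w2)):
--             x = w2[k-1] + ' ' + w2[k]
--             if x in check:
--                 check[x] = 1
--         for k in range(2, len(w2)):
--             x = w2[k-2] + ' ' + w2[k-1] + ' ' + w2[k]
--             if x in check:
--                 check[x] = 1
--         out_org.append(in_org_sentences[j])
--         out_kana.append(in_kana_sentences[j])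
--         out_phonemes.append(in_phonemes[j])
--     return out_org, out_kana, out_phonemes
-- ===== Notes on version B (the rewrite author's own statement) =====
-- stated objective: faster
-- what changed: Instead of rescanning every sentence (with an inner window scan) for each sorted nonzero chain, B tokenizes each sentence once and builds bigram/trigram -> first-sentence-index maps in a single pass, so each chain is resolved by one O(1) dictionary lookup.
import Mathlib
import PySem

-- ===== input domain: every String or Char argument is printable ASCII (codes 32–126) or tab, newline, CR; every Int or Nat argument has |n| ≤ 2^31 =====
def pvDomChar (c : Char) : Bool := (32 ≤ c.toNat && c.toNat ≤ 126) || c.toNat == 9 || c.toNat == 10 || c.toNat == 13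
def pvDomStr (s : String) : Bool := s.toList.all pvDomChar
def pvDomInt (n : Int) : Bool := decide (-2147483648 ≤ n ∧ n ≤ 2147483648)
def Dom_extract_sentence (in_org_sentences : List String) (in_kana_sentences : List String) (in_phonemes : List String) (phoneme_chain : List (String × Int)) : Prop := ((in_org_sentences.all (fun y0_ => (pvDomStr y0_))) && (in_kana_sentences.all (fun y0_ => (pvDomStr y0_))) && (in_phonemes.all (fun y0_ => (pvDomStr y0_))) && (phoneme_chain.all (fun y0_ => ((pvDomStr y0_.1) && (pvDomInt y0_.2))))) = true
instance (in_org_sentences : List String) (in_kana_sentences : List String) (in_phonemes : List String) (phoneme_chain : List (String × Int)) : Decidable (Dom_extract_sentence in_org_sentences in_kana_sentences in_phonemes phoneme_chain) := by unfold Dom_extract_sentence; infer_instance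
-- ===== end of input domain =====

-- B replaces A's per-chain rescan of all sentences by precomputed n-gram → first-sentence-index maps
-- (objective: faster; A is O(C·S·L), B is O((S+C)·L)).  Equivalence is about the RETURN value; neither
-- program mutates its arguments.


-- state threaded through the chain loop of both ports: (check dict, out_org, out_kana, out_phonemes)
abbrev PvSt := PySem.Dict String Int × List String × List String × List String

-- the marking loops ('for k in range(1,len(w2)) … / for k in range(2,len(w2)) …  if check.get(x) != None:
-- check[x] = 1'); this Python code is identical in A and in B, so both ports share this helper
def pvMark (check : PySem.Dict String Int) (w2 : List String) : PySem.Dict String Int :=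
  let c1 := (PySem.List.pyRange 1 (w2.length : Int) 1).foldl (fun c k =>
    let x := PySem.List.pyGetD w2 (k-1) "" ++ " " ++ PySem.List.pyGetD w2 k ""
    if (c.get? x).isSome then c.insert x 1 else c) check
  (PySem.List.pyRange 2 (w2.length : Int) 1).foldl (fun c k =>
    let x := PySem.List.pyGetD w2 (k-2) "" ++ " " ++ PySem.List.pyGetD w2 (k-1) "" ++ " " ++ PySem.List.pyGetD w2 k ""
    if (c.get? x).isSome then c.insert x 1 else c) c1

-- ===== PORT A =====
-- A's find_chain computation on one sentence (the window-scanning k-loop, chosen by len(w1))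
def pvFindChainA (w1 w2 : List String) : Bool :=
  match w1 with
  | [a, b] => (PySem.List.pyRange 1 (w2.length : Int) 1).any (fun k =>
      (PySem.List.pyGetD w2 (k-1) "" == a) && (PySem.List.pyGetD w2 k "" == b))
  | [a, b, c] => (PySem.List.pyRange 2 (w2.length : Int) 1).any (fun k =>
      (PySem.List.pyGetD w2 (k-2) "" == a) && (PySem.List.pyGetD w2 (k-1) "" == b) && (PySem.List.pyGetD w2 k "" == c))
  | _ => false

-- one iteration of A's loop over phoneme_chain_sorted; A's inner 'for j in range(0, len(in_phonemes)):
-- … if find_chain: …; break' changes no state before the matching j, so it is the first element of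
-- enumerate(in_phonemes) whose sentence makes find_chain true.  Indexing in_org/in_kana with pyGetD ""
-- stands for Python's in_org_sentences[j] / in_kana_sentences[j]: exact while j is in range, and Pre_
-- excludes the IndexError inputs.
def pvStepA (org kana phon : List String) (st : PvSt) (kv : String × Int) : PvSt :=
  if st.1.getD kv.1 0 == 0 then
    let w1 := PySem.Str.split₀ kv.1
    match (PySem.List.enumerate phon 0).find? (fun p => pvFindChainA w1 (PySem.Str.split₀ p.2)) with
    | some (j, s) =>
      (pvMark st.1 (PySem.Str.split₀ s),
       st.2.1 ++ [PySem.List.pyGetD org j ""],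
       st.2.2.1 ++ [PySem.List.pyGetD kana j ""],
       st.2.2.2 ++ [s])
    | none => st
  else st

def extract_sentence (in_org_sentences : List String) (in_kana_sentences : List String) (in_phonemes : List String) (phoneme_chain : List (String × Int)) : List (List String) :=
  let d := PySem.Dict.ofList phoneme_chain
  let nz := d.items.foldl (fun (acc : PySem.Dict String Int) kv => if kv.2 != 0 then acc.insert kv.1 kv.2 else acc) PySem.Dict.empty
  let check0 := nz.items.foldl (fun (acc : PySem.Dict String Int) kv => acc.insert kv.1 (0 : Int)) PySem.Dict.empty
  let chains := PySem.List.sorted nz.items (fun x => x.2) false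
  let st := chains.foldl (pvStepA in_org_sentences in_kana_sentences in_phonemes) (check0, [], [], [])
  [st.2.1, st.2.2.1, st.2.2.2]

-- ===== PORT B =====
-- zip(w, w[1:]) and zip(w, w[1:], w[2:])
def pvWindows2 (w : List String) : List (String × String) := w.zip w.tail
def pvWindows3 (w : List String) : List (String × String × String) := w.zip (w.tail.zip w.tail.tail)

-- Source B's single pass over enumerate(toks) filling both first-occurrence maps with setdefault
def pvFirstMaps (toks : List (List String)) : PySem.Dict (String × String) Int × PySem.Dict (String × String × String) Int :=
  (PySem.List.enumerate toks 0).foldl (fun dd p =>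
    ((pvWindows2 p.2).foldl (fun d q => d.setdefault q p.1) dd.1,
     (pvWindows3 p.2).foldl (fun d q => d.setdefault q p.1) dd.2)) (PySem.Dict.empty, PySem.Dict.empty)

-- one iteration of Source B's loop over chains: an O(1) map lookup replaces A's scan over all sentences;
-- pyGetD stands for Source B's toks[j] / in_org_sentences[j] / … exactly as in port A
def pvStepB (org kana phon : List String) (toks : List (List String))
    (first2 : PySem.Dict (String × String) Int) (first3 : PySem.Dict (String × String × String) Int)
    (st : PvSt) (kv : String × Int) : PvSt :=
  if st.1.getD kv.1 0 != 0 then st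
  else
    let w1 := PySem.Str.split₀ kv.1
    let j? : Option Int :=
      match w1 with
      | [a, b] => first2.get? (a, b)
      | [a, b, c] => first3.get? (a, b, c)
      | _ => none
    match j? with
    | none => st
    | some j =>
      (pvMark st.1 (PySem.List.pyGetD toks j []),
       st.2.1 ++ [PySem.List.pyGetD org j ""],
       st.2.2.1 ++ [PySem.List.pyGetD kana j ""],
       st.2.2.2 ++ [PySem.List.pyGetD phon j ""])

def extract_sentence_alt (in_org_sentences : List String) (in_kana_sentences : List String) (in_phonemes : List String) (phoneme_chain : List (String × Int)) : List (List String) :=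
  let toks := in_phonemes.map PySem.Str.split₀
  let fm := pvFirstMaps toks
  let nonzero := (PySem.Dict.ofList phoneme_chain).items.filter (fun kv => kv.2 != 0)
  let chains := PySem.List.sorted nonzero (fun x => x.2) false
  let check0 := nonzero.foldl (fun (acc : PySem.Dict String Int) kv => acc.insert kv.1 (0 : Int)) PySem.Dict.empty
  let st := chains.foldl (pvStepB in_org_sentences in_kana_sentences in_phonemes toks fm.1 fm.2) (check0, [], [], [])
  [st.2.1, st.2.2.1, st.2.2.2]

-- ===== PRECONDITION & SPEC =====
-- Pre_ excludes the inputs on which Python A (and Python B) raise IndexError: some sentence index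
-- reachable only beyond the end of in_org_sentences/in_kana_sentences whose phoneme tokens contain a
-- nonzero chain's 2- or 3-token window.  This is slightly narrower than 'A raises' (such a sentence may
-- never be selected because the chain is already covered by an earlier sentence): A still returns on
-- those excluded inputs, and B returns the same value there; see the cite in claim.json.
def Pre_extract_sentence (in_org_sentences : List String) (in_kana_sentences : List String) (in_phonemes : List String) (phoneme_chain : List (String × Int)) : Prop :=
  ∀ k : Nat, (hk : k < in_phonemes.length) →
    min in_org_sentences.length in_kana_sentences.length ≤ k →
    ∀ kv ∈ (PySem.Dict.ofList phoneme_chain).items, kv.2 ≠ 0 →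
      ((PySem.Str.split₀ kv.1).length = 2 ∨ (PySem.Str.split₀ kv.1).length = 3) →
      ¬ (PySem.Str.split₀ kv.1 <:+: PySem.Str.split₀ in_phonemes[k])
instance (in_org_sentences : List String) (in_kana_sentences : List String) (in_phonemes : List String) (phoneme_chain : List (String × Int)) : Decidable (Pre_extract_sentence in_org_sentences in_kana_sentences in_phonemes phoneme_chain) := by unfold Pre_extract_sentence; infer_instance

def pvWitness_extract_sentence : List String × List String × List String × (List (String × Int)) :=
  (["I saw it."], ["a i u"], ["a i u"], [("a i", 2), ("i u", 1), ("x y", 0)])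

def Spec_extract_sentence (in_org_sentences : List String) (in_kana_sentences : List String) (in_phonemes : List String) (phoneme_chain : List (String × Int)) (out : List (List String)) : Prop := out = extract_sentence_alt in_org_sentences in_kana_sentences in_phonemes phoneme_chain
instance (in_org_sentences : List String) (in_kana_sentences : List String) (in_phonemes : List String) (phoneme_chain : List (String × Int)) (out : List (List String)) : Decidable (Spec_extract_sentence in_org_sentences in_kana_sentences in_phonemes phoneme_chain out) := by unfold Spec_extract_sentence; infer_instance

-- ===== CLAIM (what is proved, stated in full; the proofs are below) =====
def Claim_equal_extract_sentence : Prop := ∀ (in_org_sentences : List String) (in_kana_sentences : List String) (in_phonemes : List String) (phoneme_chain : List (String × Int)), Dom_extract_sentence in_org_sentences in_kana_sentences in_phonemes phoneme_chain → Pre_extract_sentence in_org_sentences in_kana_sentences in_phonemes phoneme_chain → Spec_extract_sentence in_org_sentences in_kana_sentences in_phonemes phoneme_chain (extract_sentence in_org_sentences in_kana_sentences in_phonemes phoneme_chain)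

-- ===== LEMMAS AND PROOFS =====

-- A's nonzero-filter loop builds a dict whose items list is exactly the filtered items list B uses
theorem pv_nz_items (chain : List (String × Int)) :
    ((PySem.Dict.ofList chain).items.foldl (fun (acc : PySem.Dict String Int) kv => if kv.2 != 0 then acc.insert kv.1 kv.2 else acc) PySem.Dict.empty).items
      = (PySem.Dict.ofList chain).items.filter (fun kv => kv.2 != 0) := by
  rw [← List.foldl_filter]
  have h := PySem.Dict.items_foldl_insert_fresh
    ((PySem.Dict.ofList chain).items.filter (fun kv => kv.2 != 0)) Prod.fst Prod.snd PySem.Dict.empty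
    (by intro a _; simp [PySem.Dict.empty, PySem.Dict.contains])
    (by
      have : ((PySem.Dict.ofList chain).items.filter (fun kv => kv.2 != 0)).map Prod.fst |>.Sublist ((PySem.Dict.ofList chain).items.map Prod.fst) :=
        List.Sublist.map _ List.filter_sublist
      exact (PySem.Dict.nodup_keys_ofList chain).sublist this)
  simpa using h

-- a setdefault fold over one windows list keeps the first binding of each key
theorem pv_setdefault_fold_get {κ : Type} [BEq κ] [LawfulBEq κ] (ws : List κ) (j : Int) (d : PySem.Dict κ Int) (q : κ) :
    ((ws.foldl (fun d q' => d.setdefault q' j) d).get? q)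
      = (d.get? q).or (if q ∈ ws then some j else none) := by
  induction ws generalizing d with
  | nil => simp
  | cons w ws ih =>
    rw [List.foldl_cons, ih]
    by_cases hqw : q = w
    · subst hqw
      rw [PySem.Dict.get?_setdefault_self]
      simp only [List.mem_cons, true_or, if_pos]
      cases h : d.get? q <;> simp [Option.or]
    · rw [PySem.Dict.get?_setdefault_of_ne _ _ hqw]
      simp [List.mem_cons, hqw]

-- first-occurrence characterisation of the whole setdefault fold, for one windows function
theorem pv_firstMap_get {κ : Type} [BEq κ] [LawfulBEq κ] (wf : List String → List κ)
    (et : List (Int × List String)) (d : PySem.Dict κ Int) (q : κ) :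
    ((et.foldl (fun d p => (wf p.2).foldl (fun d q' => d.setdefault q' p.1) d) d).get? q)
      = (d.get? q).or ((et.find? (fun p => decide (q ∈ wf p.2))).map (·.1)) := by
  induction et generalizing d with
  | nil => simp
  | cons p et ih =>
    rw [List.foldl_cons, ih, pv_setdefault_fold_get]
    by_cases hq : q ∈ wf p.2
    · simp only [List.find?_cons, hq, decide_true, if_pos]
      cases d.get? q <;> rfl
    · simp [hq]

-- A's bigram window scan on one sentence is membership of the token pair in zip(w, w[1:])
theorem pv_find2_eq (a b : String) (w : List String) :
    pvFindChainA [a, b] w = decide ((a, b) ∈ pvWindows2 w) := by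
  have hlen : (pvWindows2 w).length = w.length - 1 := by
    simp [pvWindows2, List.length_zip, List.length_tail]
  rcases h : decide ((a, b) ∈ pvWindows2 w) with _ | _
  · simp only [decide_eq_false_iff_not] at h
    simp only [pvFindChainA, List.any_eq_false]
    intro k hk
    rw [PySem.List.mem_pyRange_one] at hk
    obtain ⟨h1, h2⟩ := hk
    obtain ⟨i, hki⟩ : ∃ i : Nat, k = (i : Int) + 1 := ⟨(k-1).toNat, by omega⟩
    have hi1 : i + 1 < w.length := by omega
    have e1 : PySem.List.pyGetD w (k - 1) "" = w[i] := by
      rw [show k - 1 = (i : Int) by omega, PySem.List.pyGetD_natCast, List.getD_eq_getElem _ _ (by omega)]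
    have e2 : PySem.List.pyGetD w k "" = w[i+1] := by
      rw [show k = ((i+1 : Nat) : Int) by omega, PySem.List.pyGetD_natCast, List.getD_eq_getElem _ _ hi1]
    rw [e1, e2]
    by_contra hcon
    simp only [Bool.and_eq_true, beq_iff_eq] at hcon
    apply h
    have : (pvWindows2 w)[i] = (a, b) := by
      simp only [pvWindows2, List.getElem_zip, List.getElem_tail]
      exact Prod.ext hcon.1 hcon.2
    exact this ▸ List.getElem_mem (by omega)
  · simp only [decide_eq_true_eq] at h
    obtain ⟨i, hi, hget⟩ := List.mem_iff_getElem.mp h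
    simp only [pvWindows2, List.getElem_zip, List.getElem_tail, Prod.mk.injEq] at hget
    have hi1 : i + 1 < w.length := by omega
    simp only [pvFindChainA, List.any_eq_true]
    refine ⟨(i : Int) + 1, PySem.List.mem_pyRange_one.mpr (by constructor <;> omega), ?_⟩
    have e1 : PySem.List.pyGetD w ((i:Int) + 1 - 1) "" = w[i] := by
      rw [show (i:Int) + 1 - 1 = (i : Int) by omega, PySem.List.pyGetD_natCast, List.getD_eq_getElem _ _ (by omega)]
    have e2 : PySem.List.pyGetD w ((i:Int) + 1) "" = w[i+1] := by
      rw [show (i:Int) + 1 = ((i+1 : Nat) : Int) by omega, PySem.List.pyGetD_natCast, List.getD_eq_getElem _ _ hi1]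
    rw [e1, e2]
    simp [hget.1, hget.2]

-- A's trigram window scan on one sentence is membership of the token triple in zip(w, w[1:], w[2:])
theorem pv_find3_eq (a b c : String) (w : List String) :
    pvFindChainA [a, b, c] w = decide ((a, b, c) ∈ pvWindows3 w) := by
  have hlen : (pvWindows3 w).length = w.length - 2 := by
    simp [pvWindows3, List.length_zip, List.length_tail]; omega
  rcases h : decide ((a, b, c) ∈ pvWindows3 w) with _ | _
  · simp only [decide_eq_false_iff_not] at h
    simp only [pvFindChainA, List.any_eq_false]
    intro k hk
    rw [PySem.List.mem_pyRange_one] at hk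
    obtain ⟨h1, h2⟩ := hk
    obtain ⟨i, hki⟩ : ∃ i : Nat, k = (i : Int) + 2 := ⟨(k-2).toNat, by omega⟩
    have hi2 : i + 2 < w.length := by omega
    have e1 : PySem.List.pyGetD w (k - 2) "" = w[i] := by
      rw [show k - 2 = (i : Int) by omega, PySem.List.pyGetD_natCast, List.getD_eq_getElem _ _ (by omega)]
    have e2 : PySem.List.pyGetD w (k - 1) "" = w[i+1] := by
      rw [show k - 1 = ((i+1 : Nat) : Int) by omega, PySem.List.pyGetD_natCast, List.getD_eq_getElem _ _ (by omega)]
    have e3 : PySem.List.pyGetD w k "" = w[i+2] := by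
      rw [show k = ((i+2 : Nat) : Int) by omega, PySem.List.pyGetD_natCast, List.getD_eq_getElem _ _ hi2]
    rw [e1, e2, e3]
    by_contra hcon
    simp only [Bool.and_eq_true, beq_iff_eq] at hcon
    apply h
    have : (pvWindows3 w)[i] = (a, b, c) := by
      simp only [pvWindows3, List.getElem_zip, List.getElem_tail]
      exact Prod.ext hcon.1.1 (Prod.ext hcon.1.2 hcon.2)
    exact this ▸ List.getElem_mem (by omega)
  · simp only [decide_eq_true_eq] at h
    obtain ⟨i, hi, hget⟩ := List.mem_iff_getElem.mp h
    simp only [pvWindows3, List.getElem_zip, List.getElem_tail, Prod.mk.injEq] at hget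
    have hi2 : i + 2 < w.length := by omega
    simp only [pvFindChainA, List.any_eq_true]
    refine ⟨(i : Int) + 2, PySem.List.mem_pyRange_one.mpr (by constructor <;> omega), ?_⟩
    have e1 : PySem.List.pyGetD w ((i:Int) + 2 - 2) "" = w[i] := by
      rw [show (i:Int) + 2 - 2 = (i : Int) by omega, PySem.List.pyGetD_natCast, List.getD_eq_getElem _ _ (by omega)]
    have e2 : PySem.List.pyGetD w ((i:Int) + 2 - 1) "" = w[i+1] := by
      rw [show (i:Int) + 2 - 1 = ((i+1 : Nat) : Int) by omega, PySem.List.pyGetD_natCast, List.getD_eq_getElem _ _ (by omega)]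
    have e3 : PySem.List.pyGetD w ((i:Int) + 2) "" = w[i+2] := by
      rw [show (i:Int) + 2 = ((i+2 : Nat) : Int) by omega, PySem.List.pyGetD_natCast, List.getD_eq_getElem _ _ hi2]
    rw [e1, e2, e3]
    simp [hget.1, hget.2.1, hget.2.2]

theorem pv_enumerate_map {α β : Type} (f : α → β) (xs : List α) (s : Int) :
    PySem.List.enumerate (xs.map f) s = (PySem.List.enumerate xs s).map (fun p => (p.1, f p.2)) := by
  induction xs generalizing s with
  | nil => simp
  | cons x xs ih => simp [PySem.List.enumerate_cons, ih]

theorem pv_firstMaps_fst (toks : List (List String)) (q : String × String) :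
    (pvFirstMaps toks).1.get? q
      = ((PySem.List.enumerate toks 0).find? (fun p => decide (q ∈ pvWindows2 p.2))).map (·.1) := by
  unfold pvFirstMaps
  rw [PySem.List.foldl_prod_mk (fun d p => (pvWindows2 p.2).foldl (fun d q => d.setdefault q p.1) d)
    (fun d p => (pvWindows3 p.2).foldl (fun d q => d.setdefault q p.1) d)
    (PySem.List.enumerate toks 0) PySem.Dict.empty PySem.Dict.empty]
  rw [pv_firstMap_get]
  simp [PySem.Dict.empty, PySem.Dict.get?]

theorem pv_firstMaps_snd (toks : List (List String)) (q : String × String × String) :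
    (pvFirstMaps toks).2.get? q
      = ((PySem.List.enumerate toks 0).find? (fun p => decide (q ∈ pvWindows3 p.2))).map (·.1) := by
  unfold pvFirstMaps
  rw [PySem.List.foldl_prod_mk (fun d p => (pvWindows2 p.2).foldl (fun d q => d.setdefault q p.1) d)
    (fun d p => (pvWindows3 p.2).foldl (fun d q => d.setdefault q p.1) d)
    (PySem.List.enumerate toks 0) PySem.Dict.empty PySem.Dict.empty]
  rw [pv_firstMap_get]
  simp [PySem.Dict.empty, PySem.Dict.get?]

-- the element found by the sentence scan: its index is a Nat below len(in_phonemes), its payload the sentence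
theorem pv_found_shape {pred : Int × String → Bool} {phon : List String} {j : Int} {s : String}
    (hF : (PySem.List.enumerate phon 0).find? pred = some (j, s)) :
    ∃ k : Nat, ∃ h : k < phon.length, j = (k : Int) ∧ s = phon[k] := by
  have hmem := List.mem_of_find?_eq_some hF
  rw [PySem.List.mem_enumerate_iff] at hmem
  obtain ⟨k, h, hp⟩ := hmem
  refine ⟨k, h, ?_, ?_⟩ <;> simp_all [Prod.ext_iff]

-- the heart of the equivalence: one iteration of A's chain loop equals one iteration of B's
theorem pv_step_eq (org kana phon : List String) :
    pvStepA org kana phon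
      = pvStepB org kana phon (phon.map PySem.Str.split₀)
          (pvFirstMaps (phon.map PySem.Str.split₀)).1 (pvFirstMaps (phon.map PySem.Str.split₀)).2 := by
  funext st kv
  unfold pvStepA pvStepB
  cases hc : (st.1.getD kv.1 0 == 0) with
  | false => simp [hc, bne]
  | true =>
    simp only [hc, if_pos, bne, Bool.not_true, Bool.false_eq_true]
    generalize PySem.Str.split₀ kv.1 = w1
    match w1 with
    | [a, b] =>
      have hpred : (fun p : Int × String => pvFindChainA [a, b] (PySem.Str.split₀ p.2))
          = (fun p : Int × String => decide ((a, b) ∈ pvWindows2 (PySem.Str.split₀ p.2))) :=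
        funext fun p => pv_find2_eq a b _
      rw [hpred]
      dsimp only
      rw [pv_firstMaps_fst, pv_enumerate_map, List.find?_map]
      simp only [Function.comp_def]
      cases hF : (PySem.List.enumerate phon 0).find?
          (fun p => decide ((a, b) ∈ pvWindows2 (PySem.Str.split₀ p.2))) with
      | none => rfl
      | some pj =>
        obtain ⟨j, s⟩ := pj
        obtain ⟨k, hk, hj, hs⟩ := pv_found_shape hF
        subst hj hs
        simp [PySem.List.pyGetD_natCast, hk]
    | [a, b, c] =>
      have hpred : (fun p : Int × String => pvFindChainA [a, b, c] (PySem.Str.split₀ p.2))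
          = (fun p : Int × String => decide ((a, b, c) ∈ pvWindows3 (PySem.Str.split₀ p.2))) :=
        funext fun p => pv_find3_eq a b c _
      rw [hpred]
      dsimp only
      rw [pv_firstMaps_snd, pv_enumerate_map, List.find?_map]
      simp only [Function.comp_def]
      cases hF : (PySem.List.enumerate phon 0).find?
          (fun p => decide ((a, b, c) ∈ pvWindows3 (PySem.Str.split₀ p.2))) with
      | none => rfl
      | some pj =>
        obtain ⟨j, s⟩ := pj
        obtain ⟨k, hk, hj, hs⟩ := pv_found_shape hF
        subst hj hs
        simp [PySem.List.pyGetD_natCast, hk]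
    | [] =>
      rw [show (PySem.List.enumerate phon 0).find? (fun p => pvFindChainA [] (PySem.Str.split₀ p.2)) = none
        from List.find?_eq_none.mpr (fun x _ => by simp [pvFindChainA])]
      rfl
    | [a] =>
      rw [show (PySem.List.enumerate phon 0).find? (fun p => pvFindChainA [a] (PySem.Str.split₀ p.2)) = none
        from List.find?_eq_none.mpr (fun x _ => by simp [pvFindChainA])]
      rfl
    | a :: b :: c :: d :: t =>
      rw [show (PySem.List.enumerate phon 0).find? (fun p => pvFindChainA (a :: b :: c :: d :: t) (PySem.Str.split₀ p.2)) = none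
        from List.find?_eq_none.mpr (fun x _ => by simp [pvFindChainA])]
      rfl

-- ===== VERDICT (by name: the statement is the Claim_ definition above) =====
theorem extract_sentence_spec : Claim_equal_extract_sentence := by
  intro org kana phon chain _ _
  unfold Spec_extract_sentence extract_sentence extract_sentence_alt
  dsimp only
  rw [pv_nz_items, pv_step_eq]
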